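-- pv_equiv track=rewrite | github.com/deeppavlov/learning-to-learn | learning_to_learn/useful_functions.py | form_combinations_from_dicts
-- ===== SOURCE A (Python) =====
-- from collections import OrderedDict
--
-- def construct(obj):
--     """Used for preventing of not expected changing of class attributes"""
--     if isinstance(obj, OrderedDict):
--         new_obj = OrderedDict()
--         for key, value in obj.items():
--             new_obj[key] = construct(value)
--     elif not isinstance(obj, OrderedDict) and isinstance(obj, dict):
--         new_obj = dict()
--         for key, value in obj.items():
--             new_obj[key] = construct(value)
--     elif isinstance(obj, list):
--         new_obj = list()
--         for value in obj:
--             new_obj.append(construct(value))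
--     elif isinstance(obj, tuple):
--         base = list()
--         for value in obj:
--             base.append(construct(value))
--         new_obj = tuple(base)
--     elif isinstance(obj, str):
--         new_obj = str(obj)
--     else:
--         new_obj = obj
--     # elif isinstance(obj, (int, float, complex, type(None))) or inspect.isclass(obj):
--     #     new_obj = obj
--     # else:
--     #     raise TypeError("Object of unsupported type was passed to construct function: %s" % type(obj))
--     return new_obj
--
-- def one_dim_idx_2_multidim_indices(idx, shape):
--     indices = list()
--     quotient = idx
--     for dim in shape[::-1]:
--         indices.append(quotient % dim)
--         quotient = quotient // dim
--     indices.reverse()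
--     return indices
--
-- def cumulative_mul(sequence, init):
--     res = construct(init)
--     for a in sequence:
--         res *= a
--     return res
--
-- def all_combs(list_of_lists):
--     lengths = [len(l) for l in list_of_lists]
--     num_combs = cumulative_mul(lengths, 1)
--     combs = list()
--     for comb_num in range(num_combs):
--         indices = one_dim_idx_2_multidim_indices(comb_num, lengths)
--         combs.append([l[idx] for l, idx in zip(list_of_lists, indices)])
--     return combs
--
-- def form_combinations_from_dicts(
--         dictionaries
-- ):
--     maps = [dict() for _ in dictionaries]
--     varying_values = list()
--     varying_counter = 0
--     for d, map_ in zip(dictionaries, maps):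
--         for name, values in d.items():
--             varying_values.append(values)
--             map_[name] = varying_counter
--             varying_counter += 1
--     all_combinations = all_combs(varying_values)
--     all_insertions = list()
--     for comb in all_combinations:
--         one_set_of_of_insertions = [dict() for _ in dictionaries]
--         for one_type_insertions, map_ in zip(one_set_of_of_insertions, maps):
--             for name, idx in map_.items():
--                 one_type_insertions[name] = comb[idx]
--         all_insertions.append(one_set_of_of_insertions)
--     return all_insertions
-- ===== SOURCE B (Python) =====
-- def _prod(lists):
--     if not lists:
--         return [[]]
--     tails = _prod(lists[1:])
--     return [[v] + t for v in lists[0] for t in tails]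
--
--
-- def _rebuild(names_per_dict, comb):
--     if not names_per_dict:
--         return []
--     names = names_per_dict[0]
--     k = len(names)
--     return [dict(zip(names, comb[:k]))] + _rebuild(names_per_dict[1:], comb[k:])
--
--
-- def form_combinations_from_dicts(dictionaries):
--     names_per_dict = [list(d.keys()) for d in dictionaries]
--     value_lists = [d[name] for d, names in zip(dictionaries, names_per_dict) for name in names]
--     return [_rebuild(names_per_dict, comb) for comb in _prod(value_lists)]
-- ===== Notes on version B (the rewrite author's own statement) =====
-- stated objective: simpler
-- what changed: B replaces A's global name-to-flat-index maps, the product-of-lengths loop and the manual linear-to-multidimensional index decoding with a direct recursive Cartesian product over the per-dict value lists and a slice-based rebuild of the per-dict insertion dicts.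
import Mathlib
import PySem

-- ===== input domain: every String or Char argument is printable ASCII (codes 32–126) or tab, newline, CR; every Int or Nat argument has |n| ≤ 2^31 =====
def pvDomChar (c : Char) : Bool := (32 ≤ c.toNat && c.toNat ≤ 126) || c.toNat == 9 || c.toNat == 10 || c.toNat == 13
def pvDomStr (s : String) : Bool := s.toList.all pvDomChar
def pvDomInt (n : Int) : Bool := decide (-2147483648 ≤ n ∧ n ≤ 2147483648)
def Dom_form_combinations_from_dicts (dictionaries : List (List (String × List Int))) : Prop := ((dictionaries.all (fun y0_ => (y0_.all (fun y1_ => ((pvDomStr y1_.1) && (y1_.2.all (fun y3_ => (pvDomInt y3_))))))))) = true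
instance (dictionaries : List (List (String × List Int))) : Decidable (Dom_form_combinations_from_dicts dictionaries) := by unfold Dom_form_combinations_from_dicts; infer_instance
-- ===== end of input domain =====

-- B replaces A's flat name→index map and manual linear-index decoding by a recursive
-- Cartesian product over per-dict value lists plus a slice-based rebuild (objective: simpler).

-- ===== PORT A =====
-- construct(obj): on the Int arguments it receives here only the final 'else' branch fires
def pvConstruct (obj : Int) : Int := obj

def cumulative_mul (sequence : List Int) (init : Int) : Int :=
  sequence.foldl (fun res a => res * a) (pvConstruct init)

def one_dim_idx_2_multidim_indices (idx : Int) (shape : List Int) : List Int :=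
  -- shape[::-1] is PySem.List.slice? shape none none (-1), always `some` (step ≠ 0)
  (((PySem.List.slice? shape none none (-1)).getD []).foldl
      (fun (st : List Int × Int) dim =>
        (st.1 ++ [PySem.Int.mod st.2 dim], PySem.Int.floordiv st.2 dim))
      ([], idx)).1.reverse

def all_combs (list_of_lists : List (List Int)) : List (List Int) :=
  let lengths := list_of_lists.map (fun l => (l.length : Int))
  let num_combs := cumulative_mul lengths 1
  (PySem.List.pyRange 0 num_combs 1).foldl
    (fun combs comb_num =>
      combs ++ [(list_of_lists.zip (one_dim_idx_2_multidim_indices comb_num lengths)).map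
        -- l[idx]: idx is always in range here (it is a residue mod len(l)); default never read
        (fun li => PySem.List.pyGetD li.1 li.2 0)]) []

def form_combinations_from_dicts (dictionaries : List (List (String × List Int))) :
    List (List (List (String × Int))) :=
  -- the zipped loop over (dictionaries, maps) with state (finished maps, varying_values, varying_counter)
  let st := dictionaries.foldl
    (fun (st : List (PySem.Dict String Int) × List (List Int) × Int) d =>
      let inner := (PySem.Dict.ofList d).items.foldl
        (fun (st2 : PySem.Dict String Int × List (List Int) × Int) nv =>
          (st2.1.insert nv.1 st2.2.2, st2.2.1 ++ [nv.2], st2.2.2 + 1))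
        (PySem.Dict.empty, st.2.1, st.2.2)
      (st.1 ++ [inner.1], inner.2.1, inner.2.2))
    ([], [], 0)
  (all_combs st.2.1).foldl
    (fun all_insertions comb =>
      all_insertions ++ [st.1.map (fun map_ =>
        (map_.items.foldl (fun (ins : PySem.Dict String Int) ni =>
            ins.insert ni.1 (PySem.List.pyGetD comb ni.2 0)) PySem.Dict.empty).items)]) []

-- ===== PORT B =====
def pvProd : List (List Int) → List (List Int)
  | [] => [[]]
  | h :: rest =>
      let tails := pvProd rest
      h.flatMap (fun v => tails.map (fun t => [v] ++ t))

def pvRebuild : List (List String) → List Int → List (List (String × Int))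
  | [], _ => []
  | names :: rest, comb =>
      (PySem.Dict.ofList (names.zip (PySem.List.slice comb none (some (names.length : Int))))).items
        :: pvRebuild rest (PySem.List.slice comb (some (names.length : Int)) none)

def form_combinations_from_dicts_alt (dictionaries : List (List (String × List Int))) :
    List (List (List (String × Int))) :=
  let names_per_dict := dictionaries.map (fun d => PySem.Dict.keys (PySem.Dict.ofList d))
  let value_lists := (dictionaries.zip names_per_dict).flatMap
      (fun dn => dn.2.map (fun name => (PySem.Dict.ofList dn.1).getD name []))
  (pvProd value_lists).map (fun comb => pvRebuild names_per_dict comb)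

-- ===== PRECONDITION & SPEC =====
def Spec_form_combinations_from_dicts (dictionaries : List (List (String × List Int))) (out : List (List (List (String × Int)))) : Prop := out = form_combinations_from_dicts_alt dictionaries
instance (dictionaries : List (List (String × List Int))) (out : List (List (List (String × Int)))) : Decidable (Spec_form_combinations_from_dicts dictionaries out) := by unfold Spec_form_combinations_from_dicts; infer_instance

-- ===== CLAIM (what is proved, stated in full; the proofs are below) =====
def Claim_equal_form_combinations_from_dicts : Prop := ∀ (dictionaries : List (List (String × List Int))), Dom_form_combinations_from_dicts dictionaries → Spec_form_combinations_from_dicts dictionaries (form_combinations_from_dicts dictionaries)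

-- ===== LEMMAS AND PROOFS =====

-- linear index decoding, recursively over the (already reversed) shape
def pvDecode : List Int → Int → List Int
  | [], _ => []
  | e :: es, q => PySem.Int.mod q e :: pvDecode es (PySem.Int.floordiv q e)

def pvDecodeR (shape : List Int) (q : Int) : List Int := (pvDecode shape.reverse q).reverse

-- the name→index assignments A's first loop stores in one map / in all maps
def pvIdxAssign : List (String × List Int) → Int → List (String × Int)
  | [], _ => []
  | p :: ps, c => (p.1, c) :: pvIdxAssign ps (c + 1)

def pvMapsItems : List (List (String × List Int)) → Int → List (List (String × Int))
  | [], _ => []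
  | d :: rest, c => pvIdxAssign d c :: pvMapsItems rest (c + d.length)

-- [l[idx] for l, idx in zip(list_of_lists, indices)]
def pvZG : List (List Int) → List Int → List Int
  | l :: ls, x :: xs => PySem.List.pyGetD l x 0 :: pvZG ls xs
  | _, _ => []

theorem items_ofList_nodup {ν : Type} (ps : List (String × ν)) (h : (ps.map Prod.fst).Nodup) :
    (PySem.Dict.ofList ps).items = ps := by
  have := PySem.Dict.items_foldl_insert_fresh ps Prod.fst Prod.snd (PySem.Dict.empty)
    (by simp [PySem.Dict.contains_empty]) h
  simpa using this

theorem decode_fold (es : List Int) (acc : List Int) (q : Int) :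
    (es.foldl (fun (st : List Int × Int) dim =>
        (st.1 ++ [PySem.Int.mod st.2 dim], PySem.Int.floordiv st.2 dim)) (acc, q)).1
      = acc ++ pvDecode es q := by
  induction es generalizing acc q with
  | nil => simp [pvDecode]
  | cons e es ih => simp [pvDecode, ih]

theorem one_dim_eq (idx : Int) (shape : List Int) :
    one_dim_idx_2_multidim_indices idx shape = pvDecodeR shape idx := by
  unfold one_dim_idx_2_multidim_indices pvDecodeR
  rw [PySem.List.slice?_none_none_neg_one]
  simp only [Option.getD_some]
  rw [decode_fold]
  simp

theorem decode_append (es : List Int) (d q : Int) :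
    pvDecode (es ++ [d]) q
      = pvDecode es q ++ [PySem.Int.mod (es.foldl (fun a e => PySem.Int.floordiv a e) q) d] := by
  induction es generalizing q with
  | nil => simp [pvDecode]
  | cons e es ih => simp [pvDecode, ih]

theorem foldl_floordiv_prod (es : List Int) (q : Int) (h : ∀ e ∈ es, 0 < e) :
    es.foldl (fun a e => PySem.Int.floordiv a e) q = PySem.Int.floordiv q es.prod := by
  induction es generalizing q with
  | nil => simp
  | cons e es ih =>
      have he : 0 < e := h e (by simp)
      have hp : 0 < es.prod := List.prod_pos (fun x hx => h x (by simp [hx]))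
      rw [List.foldl_cons, ih _ (fun x hx => h x (by simp [hx])), List.prod_cons]
      rw [PySem.Int.floordiv_eq_ediv_of_pos he, PySem.Int.floordiv_eq_ediv_of_pos hp,
        PySem.Int.floordiv_eq_ediv_of_pos (by positivity)]
      exact Int.ediv_ediv_of_nonneg he.le

theorem decodeR_cons (d : Int) (ds : List Int) (q : Int) (h : ∀ e ∈ ds, 0 < e) :
    pvDecodeR (d :: ds) q
      = PySem.Int.mod (PySem.Int.floordiv q ds.prod) d :: pvDecodeR ds q := by
  unfold pvDecodeR
  rw [List.reverse_cons, decode_append, foldl_floordiv_prod _ _ (by simpa using h)]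
  simp

theorem decodeR_shift (ds : List Int) (h : ∀ e ∈ ds, 0 < e) (j k : Int) :
    pvDecodeR ds (j * ds.prod + k) = pvDecodeR ds k := by
  induction ds generalizing j with
  | nil => rfl
  | cons e es ih =>
      have he : 0 < e := h e (by simp)
      have hes : ∀ x ∈ es, 0 < x := fun x hx => h x (by simp [hx])
      have hq : 0 < es.prod := List.prod_pos hes
      rw [decodeR_cons _ _ _ hes, decodeR_cons _ _ _ hes]
      have harg : j * (e :: es).prod + k = j * e * es.prod + k := by
        rw [List.prod_cons]; ring_nf
      rw [harg, ih hes (j * e)]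
      congr 1
      rw [PySem.Int.floordiv_eq_ediv_of_pos hq, PySem.Int.floordiv_eq_ediv_of_pos hq,
        PySem.Int.mod_eq_emod_of_pos he, PySem.Int.mod_eq_emod_of_pos he]
      have harg2 : j * e * es.prod + k = k + j * e * es.prod := by ring
      rw [harg2, Int.add_mul_ediv_right _ _ (by omega : es.prod ≠ 0)]
      rw [Int.add_mul_emod_self_right]

theorem zipmap_eq_zg (ll : List (List Int)) (idxs : List Int) :
    (ll.zip idxs).map (fun li => PySem.List.pyGetD li.1 li.2 0) = pvZG ll idxs := by
  induction ll generalizing idxs with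
  | nil => cases idxs <;> rfl
  | cons l ls ih => cases idxs with
      | nil => rfl
      | cons x xs => simp [pvZG, ih]

theorem all_combs_eq (ll : List (List Int)) :
    all_combs ll = (List.range (ll.map List.length).prod).map
      (fun (i : Nat) => pvZG ll (pvDecodeR (ll.map (fun l => ((l.length : Int)))) ((i : Nat) : Int))) := by
  unfold all_combs cumulative_mul pvConstruct
  rw [PySem.List.foldl_append_singleton_eq_map]
  have hprod : (ll.map (fun l => ((l.length : Int)))).foldl (fun res a => res * a) 1
      = (((ll.map List.length).prod : Nat) : Int) := by
    rw [← List.prod_eq_foldl, Nat.cast_list_prod, List.map_map]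
    rfl
  rw [hprod, PySem.List.pyRange_zero_natCast]
  simp only [List.map_map, List.nil_append]
  refine List.map_congr_left (fun i _ => ?_)
  simp only [Function.comp]
  rw [one_dim_eq, zipmap_eq_zg]

theorem pvProd_nil_of_prod_zero (ll : List (List Int)) (h : (ll.map List.length).prod = 0) :
    pvProd ll = [] := by
  induction ll with
  | nil => simp at h
  | cons l ls ih =>
      simp only [List.map_cons, List.prod_cons, Nat.mul_eq_zero] at h
      cases h with
      | inl h => simp [pvProd, List.length_eq_zero_iff.mp h]
      | inr h => simp [pvProd, ih h]

theorem length_mem_pvProd (ll : List (List Int)) (c : List Int) (h : c ∈ pvProd ll) :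
    c.length = ll.length := by
  induction ll generalizing c with
  | nil => simp [pvProd] at h; simp [h]
  | cons l ls ih =>
      simp only [pvProd, List.mem_flatMap, List.mem_map] at h
      obtain ⟨v, _, t, ht, rfl⟩ := h
      simp [ih t ht]

theorem flatMap_range_getD {β : Type} (l : List Int) (g : Int → List β) :
    (List.range l.length).flatMap (fun j => g (l.getD j 0)) = l.flatMap g := by
  induction l with
  | nil => simp
  | cons x xs ih =>
      rw [List.length_cons, List.range_succ_eq_map]
      simp only [List.flatMap_cons, List.flatMap_map,
        List.getD_cons_zero, List.getD_cons_succ]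
      rw [ih]

theorem range_mul_flatMap (e q : Nat) :
    List.range (e * q) = (List.range e).flatMap (fun j => (List.range q).map (fun k => j * q + k)) := by
  induction e with
  | zero => simp
  | succ e ih =>
      rw [Nat.succ_mul, List.range_add, ih, List.range_succ]
      simp

theorem zip_take_self' {α β : Type} (l : List α) (l' : List β) :
    l.zip l' = l.zip (l'.take l.length) := by
  induction l generalizing l' with
  | nil => simp
  | cons x xs ih => cases l' with
      | nil => simp
      | cons y ys =>
          simp only [List.length_cons, List.take_succ_cons, List.zip_cons_cons]
          rw [← ih]

theorem castprod (ls : List (List Int)) :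
    (ls.map (fun l => ((l.length : Int)))).prod = (((ls.map List.length).prod : Nat) : Int) := by
  rw [Nat.cast_list_prod, List.map_map]; rfl

theorem all_combs_eq_pvProd (ll : List (List Int)) : all_combs ll = pvProd ll := by
  induction ll with
  | nil => decide
  | cons l ls ih =>
      by_cases hz : ((l :: ls).map List.length).prod = 0
      · rw [all_combs_eq, hz, pvProd_nil_of_prod_zero _ hz]
        simp
      · rw [all_combs_eq]
        have hls : ∀ m ∈ ls, 0 < m.length := by
          intro m hm
          by_contra h0
          apply hz
          simp only [List.map_cons, List.prod_cons]
          exact Nat.mul_eq_zero.mpr (Or.inr (List.prod_eq_zero (List.mem_map.mpr ⟨m, hm, by omega⟩)))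
        have he : 0 < l.length := by
          by_contra h0
          apply hz
          simp only [List.map_cons, List.prod_cons]
          exact Nat.mul_eq_zero.mpr (Or.inl (by omega))
        have hlenspos : ∀ e ∈ ls.map (fun m => ((m.length : Int))), 0 < e := by
          intro e hedef
          simp only [List.mem_map] at hedef
          obtain ⟨m, hm, rfl⟩ := hedef
          exact_mod_cast hls m hm
        have hqpos : 0 < (ls.map List.length).prod := List.prod_pos (by
          intro x hx
          simp only [List.mem_map] at hx
          obtain ⟨m, hm, rfl⟩ := hx
          exact hls m hm)
        have hprodcast : (ls.map (fun m => ((m.length : Int)))).prod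
            = (((ls.map List.length).prod : Nat) : Int) := castprod ls
        simp only [List.map_cons, List.prod_cons]
        rw [range_mul_flatMap, List.map_flatMap]
        have hstep : ∀ j ∈ List.range l.length,
            (List.map (fun (i : Nat) => pvZG (l :: ls)
                (pvDecodeR ((l.length : Int) :: ls.map (fun m => ((m.length : Int)))) ((i : Nat) : Int)))
              ((List.range (ls.map List.length).prod).map (fun k => j * (ls.map List.length).prod + k)))
            = (pvProd ls).map (fun t => l.getD j 0 :: t) := by
          intro j hj
          rw [List.mem_range] at hj
          rw [List.map_map]
          have hinner : ∀ k ∈ List.range (ls.map List.length).prod,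
              ((fun (i : Nat) => pvZG (l :: ls)
                (pvDecodeR ((l.length : Int) :: ls.map (fun m => ((m.length : Int)))) ((i : Nat) : Int)))
                ∘ (fun k => j * (ls.map List.length).prod + k)) k
              = l.getD j 0 :: pvZG ls (pvDecodeR (ls.map (fun m => ((m.length : Int)))) ((k : Nat) : Int)) := by
            intro k hk
            rw [List.mem_range] at hk
            simp only [Function.comp]
            rw [decodeR_cons _ _ _ hlenspos, hprodcast]
            have hcast : (((j * (ls.map List.length).prod + k : Nat)) : Int)
                = (j : Int) * (((ls.map List.length).prod : Nat) : Int) + (k : Int) := by push_cast; ring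
            rw [hcast]
            have hshift := decodeR_shift (ls.map (fun m => ((m.length : Int)))) hlenspos (j : Int) (k : Int)
            rw [hprodcast] at hshift
            rw [hshift]
            have hqz : (0:Int) < (((ls.map List.length).prod : Nat) : Int) := by exact_mod_cast hqpos
            have hdivhead : PySem.Int.mod (PySem.Int.floordiv
                ((j : Int) * (((ls.map List.length).prod : Nat) : Int) + (k : Int)) (((ls.map List.length).prod : Nat) : Int)) (l.length : Int) = (j : Int) := by
              rw [PySem.Int.floordiv_eq_ediv_of_pos hqz]
              have h1 : ((j : Int) * (((ls.map List.length).prod : Nat) : Int) + (k : Int))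
                  = (k : Int) + (j : Int) * (((ls.map List.length).prod : Nat) : Int) := by ring
              rw [h1, Int.add_mul_ediv_right _ _ hqz.ne']
              rw [Int.ediv_eq_zero_of_lt (by positivity) (by exact_mod_cast hk), zero_add]
              rw [PySem.Int.mod_eq_emod_of_pos (by exact_mod_cast he)]
              exact Int.emod_eq_of_lt (by positivity) (by exact_mod_cast hj)
            rw [hdivhead]
            show PySem.List.pyGetD l ((j : Int)) 0 :: _ = _
            rw [PySem.List.pyGetD_natCast]
          rw [List.map_congr_left hinner]
          rw [show (fun (a : Nat) => l.getD j 0 :: pvZG ls (pvDecodeR (ls.map (fun m => ((m.length : Int)))) ((a : Nat) : Int)))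
              = ((fun t => l.getD j 0 :: t) ∘ (fun (k : Nat) => pvZG ls (pvDecodeR (ls.map (fun m => ((m.length : Int)))) ((k : Nat) : Int)))) from rfl]
          rw [← List.map_map]
          rw [all_combs_eq] at ih
          rw [ih]
        rw [List.flatMap_congr hstep]
        rw [flatMap_range_getD l (fun v => (pvProd ls).map (fun t => v :: t))]
        simp [pvProd]

-- ==== stage 1/2: the first loop of A ====

theorem innerA (pairs : List (String × List Int)) (m : PySem.Dict String Int)
    (vv : List (List Int)) (c : Int)
    (hnd : (pairs.map Prod.fst).Nodup) (hfresh : ∀ p ∈ pairs, m.contains p.1 = false) :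
    pairs.foldl (fun (st2 : PySem.Dict String Int × List (List Int) × Int) nv =>
        (st2.1.insert nv.1 st2.2.2, st2.2.1 ++ [nv.2], st2.2.2 + 1)) (m, vv, c)
      = (PySem.Dict.mk (m.items ++ pvIdxAssign pairs c), vv ++ pairs.map Prod.snd,
          c + pairs.length) := by
  induction pairs generalizing m vv c with
  | nil =>
      simp only [List.foldl_nil, pvIdxAssign, List.append_nil, List.map_nil, List.length_nil,
        Nat.cast_zero, add_zero]
  | cons p ps ih =>
      simp only [List.map_cons, List.nodup_cons] at hnd
      have hfp : m.contains p.1 = false := hfresh p (by simp)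
      have hfresh' : ∀ r ∈ ps, (m.insert p.1 c).contains r.1 = false := by
        intro r hr
        rw [PySem.Dict.contains_insert]
        have hne : r.1 ≠ p.1 := by
          intro hcontra
          exact hnd.1 (hcontra ▸ List.mem_map_of_mem hr)
        simp [hne, hfresh r (by simp [hr])]
      rw [List.foldl_cons, ih (m.insert p.1 c) (vv ++ [p.2]) (c + 1) hnd.2 hfresh']
      have hitems : (m.insert p.1 c).items = m.items ++ [(p.1, c)] :=
        PySem.Dict.items_insert_of_not_contains m c hfp
      rw [hitems]
      simp only [pvIdxAssign, List.append_assoc, List.singleton_append, List.map_cons,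
        List.length_cons, Prod.mk.injEq, true_and]
      push_cast
      ring

theorem outerA (dss : List (List (String × List Int))) (accmaps : List (PySem.Dict String Int))
    (vv : List (List Int)) (c : Int) :
    dss.foldl (fun (st : List (PySem.Dict String Int) × List (List Int) × Int) d =>
        let inner := (PySem.Dict.ofList d).items.foldl
          (fun (st2 : PySem.Dict String Int × List (List Int) × Int) nv =>
            (st2.1.insert nv.1 st2.2.2, st2.2.1 ++ [nv.2], st2.2.2 + 1))
          (PySem.Dict.empty, st.2.1, st.2.2)
        (st.1 ++ [inner.1], inner.2.1, inner.2.2)) (accmaps, vv, c)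
      = (accmaps ++ (pvMapsItems (dss.map (fun d => (PySem.Dict.ofList d).items)) c).map PySem.Dict.mk,
         vv ++ (dss.map (fun d => (PySem.Dict.ofList d).items)).flatMap (fun d => d.map Prod.snd),
         c + ((dss.map (fun d => (PySem.Dict.ofList d).items)).map List.length).sum) := by
  induction dss generalizing accmaps vv c with
  | nil => simp [pvMapsItems]
  | cons d rest ih =>
      rw [List.foldl_cons]
      have hnd : (((PySem.Dict.ofList d).items.map Prod.fst)).Nodup := by
        have := PySem.Dict.nodup_keys_ofList d
        simpa [PySem.Dict.keys] using this
      have hinner := innerA (PySem.Dict.ofList d).items PySem.Dict.empty vv c hnd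
        (by intro p _; exact PySem.Dict.contains_empty _)
      simp only at hinner
      rw [hinner]
      rw [ih]
      simp only [List.map_cons, pvMapsItems, List.map_cons, List.append_assoc,
        List.singleton_append, List.flatMap_cons, List.sum_cons]
      have hempty : (PySem.Dict.empty : PySem.Dict String Int).items = [] := rfl
      rw [hempty]
      simp only [List.nil_append, Prod.mk.injEq,
        true_and]
      push_cast
      ring

theorem idx_pick (d : List (String × List Int)) (pre comb : List Int)
    (h : d.length ≤ comb.length) :
    (pvIdxAssign d ((pre.length : Int))).map
        (fun p => (p.1, PySem.List.pyGetD (pre ++ comb) p.2 0))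
      = (d.map Prod.fst).zip comb := by
  induction d generalizing pre comb with
  | nil => simp [pvIdxAssign]
  | cons p ps ih =>
      cases comb with
      | nil => simp at h
      | cons v vs =>
          simp only [pvIdxAssign, List.map_cons, List.zip_cons_cons, List.cons.injEq]
          refine ⟨?_, ?_⟩
          · rw [PySem.List.pyGetD_natCast]
            simp [List.getD]
          · have hre : ((pre.length : Int)) + 1 = (((pre ++ [v]).length : Nat) : Int) := by
              simp
            have happ : pre ++ v :: vs = (pre ++ [v]) ++ vs := by simp
            rw [hre, happ]
            exact ih (pre ++ [v]) vs (by simpa using Nat.succ_le_succ_iff.mp (by simpa using h))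

theorem rebuild_eq (dss : List (List (String × List Int))) (pre comb : List Int)
    (hnd : ∀ d ∈ dss, (d.map Prod.fst).Nodup)
    (hlen : comb.length = (dss.map List.length).sum) :
    (pvMapsItems dss ((pre.length : Int))).map
        (fun mp => mp.map (fun p => (p.1, PySem.List.pyGetD (pre ++ comb) p.2 0)))
      = pvRebuild (dss.map (fun d => d.map Prod.fst)) comb := by
  induction dss generalizing pre comb with
  | nil => simp [pvMapsItems, pvRebuild]
  | cons d rest ih =>
      simp only [pvMapsItems, List.map_cons, pvRebuild, List.sum_cons] at *
      have hdlen : d.length ≤ comb.length := by omega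
      refine List.cons_eq_cons.mpr ⟨?_, ?_⟩
      · -- the head dict
        rw [idx_pick d pre comb hdlen]
        have hslice : PySem.List.slice comb none (some (((d.map Prod.fst).length : Nat) : Int))
            = comb.take d.length := by
          rw [PySem.List.slice_to_natCast]; simp
        rw [hslice]
        have hzip : (d.map Prod.fst).zip (comb.take d.length)
            = (d.map Prod.fst).zip comb := by
          rw [zip_take_self' (d.map Prod.fst) comb]
          simp
        rw [hzip]
        rw [items_ofList_nodup _ ?hnodup]
        case hnodup =>
          rw [List.map_fst_zip (by simpa using hdlen)]
          exact hnd d (by simp)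
      · -- the tail
        have hslice : PySem.List.slice comb (some (((d.map Prod.fst).length : Nat) : Int)) none
            = comb.drop d.length := by
          rw [PySem.List.slice_from_natCast]; simp
        rw [hslice]
        have hre : ((pre.length : Int)) + (d.length : Int)
            = (((pre ++ comb.take d.length).length : Nat) : Int) := by
          simp [List.length_take, Nat.min_eq_left hdlen]
        have happ : pre ++ comb = (pre ++ comb.take d.length) ++ comb.drop d.length := by
          simp
        rw [hre, happ]
        exact ih (pre ++ comb.take d.length) (comb.drop d.length)
          (fun x hx => hnd x (by simp [hx])) (by simp [List.length_drop]; omega)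


-- pvIdxAssign keeps exactly the keys
theorem idxAssign_fst (d : List (String × List Int)) (c : Int) :
    (pvIdxAssign d c).map Prod.fst = d.map Prod.fst := by
  induction d generalizing c with
  | nil => rfl
  | cons p ps ih => simp [pvIdxAssign, ih]

-- A's per-comb rebuild loop, in closed form over the list of map items
theorem per_comb_eq (mps : List (List (String × List Int))) (c : Int) (comb : List Int)
    (hnd : ∀ d ∈ mps, (d.map Prod.fst).Nodup) :
    ((pvMapsItems mps c).map PySem.Dict.mk).map (fun map_ =>
        (map_.items.foldl (fun (ins : PySem.Dict String Int) ni =>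
          ins.insert ni.1 (PySem.List.pyGetD comb ni.2 0)) PySem.Dict.empty).items)
      = (pvMapsItems mps c).map (fun mp => mp.map (fun p => (p.1, PySem.List.pyGetD comb p.2 0))) := by
  induction mps generalizing c with
  | nil => rfl
  | cons d rest ih =>
      simp only [pvMapsItems, List.map_cons, List.cons.injEq]
      refine ⟨?_, ?_⟩
      · have := PySem.Dict.items_foldl_insert_fresh (pvIdxAssign d c) Prod.fst
          (fun p => PySem.List.pyGetD comb p.2 0) PySem.Dict.empty
          (fun a _ => PySem.Dict.contains_empty _)
          (by rw [idxAssign_fst]; exact hnd d (by simp))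
        simpa using this
      · exact ih _ (fun x hx => hnd x (by simp [hx]))

theorem valuelists_eq (dictionaries : List (List (String × List Int))) :
    (dictionaries.zip (dictionaries.map (fun d => PySem.Dict.keys (PySem.Dict.ofList d)))).flatMap
        (fun dn => dn.2.map (fun name => (PySem.Dict.ofList dn.1).getD name []))
      = (dictionaries.map (fun d => (PySem.Dict.ofList d).items)).flatMap
          (fun d => d.map Prod.snd) := by
  induction dictionaries with
  | nil => rfl
  | cons d rest ih =>
      simp only [List.map_cons, List.zip_cons_cons, List.flatMap_cons, ih]
      congr 1
      have hnd := PySem.Dict.nodup_keys_ofList d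
      have hitems := PySem.Dict.items_eq_map_keys (PySem.Dict.ofList d) hnd ([] : List Int)
      rw [hitems]
      simp [List.map_map, Function.comp]

theorem main_lemma : ∀ (dictionaries : List (List (String × List Int))),
    form_combinations_from_dicts dictionaries = form_combinations_from_dicts_alt dictionaries := by
  intro dictionaries
  unfold form_combinations_from_dicts form_combinations_from_dicts_alt
  rw [outerA]
  dsimp only
  set dss := dictionaries.map (fun d => (PySem.Dict.ofList d).items) with hdss
  have hnd : ∀ d ∈ dss, (d.map Prod.fst).Nodup := by
    intro d hd
    simp only [hdss, List.mem_map] at hd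
    obtain ⟨d0, _, rfl⟩ := hd
    have := PySem.Dict.nodup_keys_ofList d0
    simpa [PySem.Dict.keys] using this
  rw [PySem.List.foldl_append_singleton_eq_map, List.nil_append, List.nil_append]
  set vv := dss.flatMap (fun d => d.map Prod.snd) with hvv
  rw [valuelists_eq, ← hdss, ← hvv]
  rw [all_combs_eq_pvProd]
  refine List.map_congr_left (fun comb hcomb => ?_)
  rw [per_comb_eq dss 0 comb hnd]
  have hnames : dictionaries.map (fun d => PySem.Dict.keys (PySem.Dict.ofList d))
      = dss.map (fun d => d.map Prod.fst) := by
    simp only [hdss, List.map_map]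
    rfl
  rw [hnames]
  have hlen : comb.length = (dss.map List.length).sum := by
    have h1 := length_mem_pvProd vv comb hcomb
    rw [h1, hvv, List.length_flatMap]
    simp
  have hc0 : (0 : Int) = ((([] : List Int).length : Nat) : Int) := by simp
  rw [hc0, ← rebuild_eq dss [] comb hnd hlen]
  rfl

-- ===== VERDICT (by name: the statement is the Claim_ definition above) =====
theorem form_combinations_from_dicts_spec : Claim_equal_form_combinations_from_dicts := by
  intro dictionaries _
  unfold Spec_form_combinations_from_dicts
  exact main_lemma dictionaries
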